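-- pv_equiv track=rewrite | github.com/peter-k-1972/linux-desktop-ai-chat | scripts/qa/incidents/build_registry.py | _build_metrics
-- ===== SOURCE A (Python) =====
-- def _incident_is_open(status: str) -> bool:
--     return status in {"new", "triaged", "classified", "replay_defined", "replay_verified"}
--
-- def _incident_is_classified(status: str) -> bool:
--     return status in {"classified", "replay_defined", "replay_verified", "bound_to_regression", "closed"}
--
-- def _incident_has_replay_defined(status: str) -> bool:
--     return status in {"replay_defined", "replay_verified", "bound_to_regression", "closed"}
--
-- def _incident_has_replay_verified(status: str) -> bool:
--     return status in {"replay_verified", "bound_to_regression", "closed"}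
--
-- def _incident_is_bound_to_regression(status: str) -> bool:
--     return status in {"bound_to_regression", "closed"}
--
-- def _build_metrics(incidents: list[dict]) -> dict[str, int]:
--     """Baut Metriken."""
--     metrics = {
--         "open_incidents": 0,
--         "classified_incidents": 0,
--         "replay_defined": 0,
--         "replay_verified": 0,
--         "bound_to_regression": 0,
--     }
--     for inc in incidents:
--         status = inc.get("status") or ""
--         if _incident_is_open(status):
--             metrics["open_incidents"] += 1
--         if _incident_is_classified(status):
--             metrics["classified_incidents"] += 1
--         if _incident_has_replay_defined(status):
--             metrics["replay_defined"] += 1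
--         if _incident_has_replay_verified(status):
--             metrics["replay_verified"] += 1
--         if _incident_is_bound_to_regression(status):
--             metrics["bound_to_regression"] += 1
--     return metrics
-- ===== SOURCE B (Python) =====
-- _OPEN = ("new", "triaged", "classified", "replay_defined", "replay_verified")
-- _CLASSIFIED = ("classified", "replay_defined", "replay_verified", "bound_to_regression", "closed")
-- _REPLAY_DEFINED = ("replay_defined", "replay_verified", "bound_to_regression", "closed")
-- _REPLAY_VERIFIED = ("replay_verified", "bound_to_regression", "closed")
-- _BOUND = ("bound_to_regression", "closed")
--
-- def _build_metrics(incidents):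
--     """Count-then-aggregate: tally statuses once, then sum the tallies per metric."""
--     counter = {}
--     for inc in incidents:
--         status = inc.get("status") or ""
--         counter[status] = counter.get(status, 0) + 1
--     def tally(names):
--         return sum(counter.get(s, 0) for s in names)
--     return {
--         "open_incidents": tally(_OPEN),
--         "classified_incidents": tally(_CLASSIFIED),
--         "replay_defined": tally(_REPLAY_DEFINED),
--         "replay_verified": tally(_REPLAY_VERIFIED),
--         "bound_to_regression": tally(_BOUND),
--     }
-- ===== Notes on version B (the rewrite author's own statement) =====
-- stated objective: alternative
-- what changed: B replaces A's per-incident five-branch accumulation with a count-then-aggregate decomposition: one pass tallies statuses into a frequency dict, then each metric is the sum of the tallies of the statuses in its set.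
import Mathlib
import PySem

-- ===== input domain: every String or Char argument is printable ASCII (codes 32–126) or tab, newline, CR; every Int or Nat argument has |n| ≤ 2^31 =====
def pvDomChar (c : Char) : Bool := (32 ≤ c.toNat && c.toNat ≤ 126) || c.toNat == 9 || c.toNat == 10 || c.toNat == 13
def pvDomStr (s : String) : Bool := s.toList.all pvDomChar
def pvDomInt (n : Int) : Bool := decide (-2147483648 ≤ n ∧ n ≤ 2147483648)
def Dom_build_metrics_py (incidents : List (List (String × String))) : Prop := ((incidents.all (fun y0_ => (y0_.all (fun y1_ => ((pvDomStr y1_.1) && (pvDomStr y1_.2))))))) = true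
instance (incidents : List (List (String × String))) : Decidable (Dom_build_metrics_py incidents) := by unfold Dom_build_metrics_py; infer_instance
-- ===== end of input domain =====

-- B replaces A's per-incident five-branch accumulation with a count-then-aggregate
-- decomposition (tally statuses once, then sum tallies per metric); alternative, same cost.

-- ===== PORT A =====
-- status = inc.get("status") or ""  (shared by both Pythons verbatim)
def pyStatus (inc : List (String × String)) : String :=
  match (PySem.Dict.mk inc).get? "status" with
  | some s => if s = "" then "" else s   -- `x or ""` : falsy "" stays ""
  | none => ""

def incident_is_open (status : String) : Bool :=
  decide (status ∈ ["new", "triaged", "classified", "replay_defined", "replay_verified"])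
def incident_is_classified (status : String) : Bool :=
  decide (status ∈ ["classified", "replay_defined", "replay_verified", "bound_to_regression", "closed"])
def incident_has_replay_defined (status : String) : Bool :=
  decide (status ∈ ["replay_defined", "replay_verified", "bound_to_regression", "closed"])
def incident_has_replay_verified (status : String) : Bool :=
  decide (status ∈ ["replay_verified", "bound_to_regression", "closed"])
def incident_is_bound_to_regression (status : String) : Bool :=
  decide (status ∈ ["bound_to_regression", "closed"])

-- the body of A's `for inc in incidents` loop
def pvStepA (metrics : PySem.Dict String Int) (inc : List (String × String)) : PySem.Dict String Int :=
  let status := pyStatus inc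
  let metrics := if incident_is_open status then metrics.modify "open_incidents" 0 (· + 1) else metrics
  let metrics := if incident_is_classified status then metrics.modify "classified_incidents" 0 (· + 1) else metrics
  let metrics := if incident_has_replay_defined status then metrics.modify "replay_defined" 0 (· + 1) else metrics
  let metrics := if incident_has_replay_verified status then metrics.modify "replay_verified" 0 (· + 1) else metrics
  let metrics := if incident_is_bound_to_regression status then metrics.modify "bound_to_regression" 0 (· + 1) else metrics
  metrics

def build_metrics_py (incidents : List (List (String × String))) : List (String × Int) :=
  let metrics : PySem.Dict String Int := PySem.Dict.mk
    [("open_incidents", 0), ("classified_incidents", 0), ("replay_defined", 0),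
     ("replay_verified", 0), ("bound_to_regression", 0)]
  (incidents.foldl pvStepA metrics).items

-- ===== PORT B =====
def pvNamesOpen : List String := ["new", "triaged", "classified", "replay_defined", "replay_verified"]
def pvNamesClassified : List String := ["classified", "replay_defined", "replay_verified", "bound_to_regression", "closed"]
def pvNamesReplayDefined : List String := ["replay_defined", "replay_verified", "bound_to_regression", "closed"]
def pvNamesReplayVerified : List String := ["replay_verified", "bound_to_regression", "closed"]
def pvNamesBound : List String := ["bound_to_regression", "closed"]

-- sum(counter.get(s, 0) for s in names)
def pvTally (counter : PySem.Dict String Int) (names : List String) : Int :=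
  names.foldl (fun acc s => acc + counter.getD s 0) 0

def build_metrics_py_alt (incidents : List (List (String × String))) : List (String × Int) :=
  let counter := incidents.foldl
    (fun c inc => c.insert (pyStatus inc) (c.getD (pyStatus inc) 0 + 1)) PySem.Dict.empty
  [("open_incidents", pvTally counter pvNamesOpen),
   ("classified_incidents", pvTally counter pvNamesClassified),
   ("replay_defined", pvTally counter pvNamesReplayDefined),
   ("replay_verified", pvTally counter pvNamesReplayVerified),
   ("bound_to_regression", pvTally counter pvNamesBound)]

-- ===== PRECONDITION & SPEC =====
def Spec_build_metrics_py (incidents : List (List (String × String))) (out : List (String × Int)) : Prop := out = build_metrics_py_alt incidents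
instance (incidents : List (List (String × String))) (out : List (String × Int)) : Decidable (Spec_build_metrics_py incidents out) := by unfold Spec_build_metrics_py; infer_instance

-- ===== CLAIM (what is proved, stated in full; the proofs are below) =====
def Claim_equal_build_metrics_py : Prop := ∀ (incidents : List (List (String × String))), Dom_build_metrics_py incidents → Spec_build_metrics_py incidents (build_metrics_py incidents)

-- ===== LEMMAS AND PROOFS =====

-- the five metric keys, in A's insertion order
def pvKeys : List String :=
  ["open_incidents", "classified_incidents", "replay_defined", "replay_verified", "bound_to_regression"]

lemma pvStepA_getD_open (m : PySem.Dict String Int) (inc : List (String × String)) :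
    (pvStepA m inc).getD "open_incidents" 0 =
      m.getD "open_incidents" 0 + (if incident_is_open (pyStatus inc) then 1 else 0) := by
  simp only [pvStepA]
  generalize incident_is_open (pyStatus inc) = b1
  generalize incident_is_classified (pyStatus inc) = b2
  generalize incident_has_replay_defined (pyStatus inc) = b3
  generalize incident_has_replay_verified (pyStatus inc) = b4
  generalize incident_is_bound_to_regression (pyStatus inc) = b5
  cases b1 <;> cases b2 <;> cases b3 <;> cases b4 <;> cases b5 <;> simp [PySem.Dict.getD_modify]

lemma pvStepA_getD_classified (m : PySem.Dict String Int) (inc : List (String × String)) :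
    (pvStepA m inc).getD "classified_incidents" 0 =
      m.getD "classified_incidents" 0 + (if incident_is_classified (pyStatus inc) then 1 else 0) := by
  simp only [pvStepA]
  generalize incident_is_open (pyStatus inc) = b1
  generalize incident_is_classified (pyStatus inc) = b2
  generalize incident_has_replay_defined (pyStatus inc) = b3
  generalize incident_has_replay_verified (pyStatus inc) = b4
  generalize incident_is_bound_to_regression (pyStatus inc) = b5
  cases b1 <;> cases b2 <;> cases b3 <;> cases b4 <;> cases b5 <;> simp [PySem.Dict.getD_modify]

lemma pvStepA_getD_rd (m : PySem.Dict String Int) (inc : List (String × String)) :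
    (pvStepA m inc).getD "replay_defined" 0 =
      m.getD "replay_defined" 0 + (if incident_has_replay_defined (pyStatus inc) then 1 else 0) := by
  simp only [pvStepA]
  generalize incident_is_open (pyStatus inc) = b1
  generalize incident_is_classified (pyStatus inc) = b2
  generalize incident_has_replay_defined (pyStatus inc) = b3
  generalize incident_has_replay_verified (pyStatus inc) = b4
  generalize incident_is_bound_to_regression (pyStatus inc) = b5
  cases b1 <;> cases b2 <;> cases b3 <;> cases b4 <;> cases b5 <;> simp [PySem.Dict.getD_modify]

lemma pvStepA_getD_rv (m : PySem.Dict String Int) (inc : List (String × String)) :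
    (pvStepA m inc).getD "replay_verified" 0 =
      m.getD "replay_verified" 0 + (if incident_has_replay_verified (pyStatus inc) then 1 else 0) := by
  simp only [pvStepA]
  generalize incident_is_open (pyStatus inc) = b1
  generalize incident_is_classified (pyStatus inc) = b2
  generalize incident_has_replay_defined (pyStatus inc) = b3
  generalize incident_has_replay_verified (pyStatus inc) = b4
  generalize incident_is_bound_to_regression (pyStatus inc) = b5
  cases b1 <;> cases b2 <;> cases b3 <;> cases b4 <;> cases b5 <;> simp [PySem.Dict.getD_modify]

lemma pvStepA_getD_bound (m : PySem.Dict String Int) (inc : List (String × String)) :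
    (pvStepA m inc).getD "bound_to_regression" 0 =
      m.getD "bound_to_regression" 0 + (if incident_is_bound_to_regression (pyStatus inc) then 1 else 0) := by
  simp only [pvStepA]
  generalize incident_is_open (pyStatus inc) = b1
  generalize incident_is_classified (pyStatus inc) = b2
  generalize incident_has_replay_defined (pyStatus inc) = b3
  generalize incident_has_replay_verified (pyStatus inc) = b4
  generalize incident_is_bound_to_regression (pyStatus inc) = b5
  cases b1 <;> cases b2 <;> cases b3 <;> cases b4 <;> cases b5 <;> simp [PySem.Dict.getD_modify]

lemma pvFoldl_getD (p : String → Bool) (k : String)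
    (hstep : ∀ m inc, (pvStepA m inc).getD k 0 = m.getD k 0 + (if p (pyStatus inc) then 1 else 0)) :
    ∀ (l : List (List (String × String))) (m : PySem.Dict String Int),
      (l.foldl pvStepA m).getD k 0 = m.getD k 0 + (l.countP (fun inc => p (pyStatus inc)) : Int) := by
  intro l
  induction l with
  | nil => intro m; simp
  | cons x xs ih =>
    intro m
    simp only [List.foldl_cons, ih, hstep, List.countP_cons]
    split_ifs <;> push_cast <;> ring

lemma pvKeys_ite_modify (m : PySem.Dict String Int) (b : Bool) (k : String)
    (h : m.keys = pvKeys) (hk : k ∈ pvKeys) :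
    (if b then m.modify k 0 (· + 1) else m).keys = pvKeys := by
  cases b with
  | false => simpa using h
  | true =>
    have hc : m.contains k = true := by
      rw [PySem.Dict.contains_eq_decide_mem_keys, h]; simpa using hk
    simp only [if_true]
    rw [PySem.Dict.keys_modify, PySem.Dict.keys_insert_of_contains _ _ hc, h]

lemma pvStepA_keys (m : PySem.Dict String Int) (inc : List (String × String))
    (h : m.keys = pvKeys) : (pvStepA m inc).keys = pvKeys := by
  unfold pvStepA
  exact pvKeys_ite_modify _ _ _
    (pvKeys_ite_modify _ _ _
      (pvKeys_ite_modify _ _ _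
        (pvKeys_ite_modify _ _ _
          (pvKeys_ite_modify _ _ _ h (by decide)) (by decide)) (by decide)) (by decide)) (by decide)

lemma pvFoldl_keys : ∀ (l : List (List (String × String))) (m : PySem.Dict String Int),
    m.keys = pvKeys → (l.foldl pvStepA m).keys = pvKeys := by
  intro l
  induction l with
  | nil => intro m h; simpa using h
  | cons x xs ih => intro m h; exact ih _ (pvStepA_keys _ _ h)

-- Σ_{s ∈ names} sts.count s = countP (· ∈ names) sts, for distinct names
lemma pvCountP_cons (n : String) (ns : List String) (hn : n ∉ ns) (sts : List String) :
    sts.countP (fun st => decide (st ∈ n :: ns)) = sts.count n + sts.countP (fun st => decide (st ∈ ns)) := by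
  induction sts with
  | nil => simp
  | cons s rest ih =>
    rw [List.countP_cons, List.countP_cons, List.count_cons, ih]
    by_cases hsn : s = n
    · subst hsn; simp [hn]; omega
    · by_cases hm : s ∈ ns
      · simp [hsn, hm]
        omega
      · simp [hsn, hm]

lemma pvSumCount (names : List String) (h : names.Nodup) (sts : List String) :
    (names.map (fun s => (sts.count s : Int))).sum = (sts.countP (fun st => decide (st ∈ names)) : Int) := by
  induction names with
  | nil => simp
  | cons n ns ih =>
    simp only [List.nodup_cons] at h
    rw [List.map_cons, List.sum_cons, ih h.2, pvCountP_cons n ns h.1 sts]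
    push_cast; ring

lemma pvTally_eq_sum (counter : PySem.Dict String Int) (names : List String) :
    pvTally counter names = (names.map (fun s => counter.getD s 0)).sum := by
  unfold pvTally
  rw [PySem.List.foldl_add]
  simp

-- the counter's lookup is a status count
lemma pvCounter_getD (incidents : List (List (String × String))) (s : String) :
    (incidents.foldl (fun c inc => c.insert (pyStatus inc) (c.getD (pyStatus inc) 0 + 1))
        PySem.Dict.empty).getD s 0 = ((incidents.map pyStatus).count s : Int) := by
  rw [← List.foldl_map (f := pyStatus)
        (g := fun (c : PySem.Dict String Int) st => c.insert st (c.getD st 0 + 1)),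
      PySem.Dict.getD_foldl_insert_add_one]
  simp

-- per-metric agreement: B's tally equals A's per-incident count
lemma pvTally_eq_countP (incidents : List (List (String × String))) (names : List String)
    (h : names.Nodup) (p : String → Bool) (hp : ∀ s, p s = decide (s ∈ names)) :
    pvTally (incidents.foldl (fun c inc => c.insert (pyStatus inc) (c.getD (pyStatus inc) 0 + 1))
        PySem.Dict.empty) names = (incidents.countP (fun inc => p (pyStatus inc)) : Int) := by
  rw [pvTally_eq_sum]
  have : (names.map (fun s =>
      (incidents.foldl (fun c inc => c.insert (pyStatus inc) (c.getD (pyStatus inc) 0 + 1))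
        PySem.Dict.empty).getD s 0)) = names.map (fun s => ((incidents.map pyStatus).count s : Int)) := by
    apply List.map_congr_left; intro s _; exact pvCounter_getD incidents s
  rw [this, pvSumCount names h, List.countP_map]
  simp only [hp]
  rfl

-- ===== VERDICT (by name: the statement is the Claim_ definition above) =====
theorem build_metrics_py_spec : Claim_equal_build_metrics_py := by
  intro incidents _
  unfold Spec_build_metrics_py build_metrics_py build_metrics_py_alt
  have hkeys := pvFoldl_keys incidents
    (PySem.Dict.mk [("open_incidents", 0), ("classified_incidents", 0), ("replay_defined", 0),
      ("replay_verified", 0), ("bound_to_regression", 0)]) (by decide)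
  have hnd : (incidents.foldl pvStepA (PySem.Dict.mk [("open_incidents", 0), ("classified_incidents", 0),
      ("replay_defined", 0), ("replay_verified", 0), ("bound_to_regression", 0)])).keys.Nodup := by
    rw [hkeys]; decide
  rw [PySem.Dict.items_eq_map_keys _ hnd 0, hkeys]
  simp only [pvKeys, List.map_cons, List.map_nil]
  rw [pvFoldl_getD _ _ pvStepA_getD_open, pvFoldl_getD _ _ pvStepA_getD_classified,
      pvFoldl_getD _ _ pvStepA_getD_rd, pvFoldl_getD _ _ pvStepA_getD_rv,
      pvFoldl_getD _ _ pvStepA_getD_bound]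
  rw [pvTally_eq_countP incidents pvNamesOpen (by decide) _ (fun s => rfl),
      pvTally_eq_countP incidents pvNamesClassified (by decide) _ (fun s => rfl),
      pvTally_eq_countP incidents pvNamesReplayDefined (by decide) _ (fun s => rfl),
      pvTally_eq_countP incidents pvNamesReplayVerified (by decide) _ (fun s => rfl),
      pvTally_eq_countP incidents pvNamesBound (by decide) _ (fun s => rfl)]
  norm_num [PySem.Dict.getD_eq_get?_getD, PySem.Dict.get?_mk_cons]
  exact ⟨rfl, rfl, rfl, rfl, rfl⟩
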